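-- pv_equiv track=rewrite | github.com/vgraeber/adventofcode | 2023/day07/part2.py | grouphandsbytype
-- ===== SOURCE A (Python) =====
-- def grouphandsbytype(sortedinputlist):
--   types = ["five", "four", "full", "three", "two", "one", "high"]
--   betterinputlist = []
--   handsonly = []
--   for type in types:
--     typegroup = []
--     handgroup = []
--     for hand in sortedinputlist:
--       if (hand["type"] == type):
--         typegroup.append(hand)
--         handgroup.append(list(hand["hand"]))
--     betterinputlist.append(typegroup)
--     handsonly.append(handgroup)
--   return betterinputlist, handsonly
-- ===== SOURCE B (Python) =====
-- def grouphandsbytype(sortedinputlist):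
--   types = ["five", "four", "full", "three", "two", "one", "high"]
--   buckets = {t: [] for t in types}
--   handbuckets = {t: [] for t in types}
--   for hand in sortedinputlist:
--     t = hand["type"]
--     if t in buckets:
--       buckets[t].append(hand)
--       handbuckets[t].append(list(hand["hand"]))
--   return list(buckets.values()), list(handbuckets.values())
-- ===== Notes on version B (the rewrite author's own statement) =====
-- stated objective: alternative
-- what changed: Replaces A's 7 full scans of the input (one per hand type) by a single pass that appends each hand into a pre-initialized dict of per-type buckets, emitted in the fixed type order via dict value order.
import Mathlib
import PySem

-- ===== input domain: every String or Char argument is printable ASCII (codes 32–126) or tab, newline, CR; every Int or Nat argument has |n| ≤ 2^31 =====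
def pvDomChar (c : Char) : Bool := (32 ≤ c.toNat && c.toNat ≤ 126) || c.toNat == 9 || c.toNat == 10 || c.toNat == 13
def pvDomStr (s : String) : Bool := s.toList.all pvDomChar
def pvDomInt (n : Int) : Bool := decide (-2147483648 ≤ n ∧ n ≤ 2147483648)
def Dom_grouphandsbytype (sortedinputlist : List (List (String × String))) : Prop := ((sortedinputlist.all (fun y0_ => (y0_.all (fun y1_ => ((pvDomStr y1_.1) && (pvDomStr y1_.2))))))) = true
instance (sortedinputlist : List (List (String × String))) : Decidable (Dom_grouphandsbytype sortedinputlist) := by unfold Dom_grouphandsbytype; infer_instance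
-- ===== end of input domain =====

-- B makes ONE pass over the input, appending each hand into a dict of per-type buckets
-- pre-keyed by the 7 type names, instead of A's 7 full scans (one scan per type).

-- shared small helpers: the 7 type names, dict lookup hand[k] (default "" used only
-- outside Pre_, where Python raises KeyError), and list(s) as single-char strings
def pvTypes : List String := ["five", "four", "full", "three", "two", "one", "high"]

def pvGet (hand : List (String × String)) (k : String) : String :=
  (PySem.Dict.mk hand).getD k ""

def pvChars (s : String) : List String := s.toList.map (fun c => String.ofList [c])

-- ===== PORT A =====
-- A: for each of the 7 types (outer loop), scan the whole input and collect matches.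
def grouphandsbytype (sortedinputlist : List (List (String × String))) : (List (List (List (String × String)))) × List (List (List String)) :=
  pvTypes.foldl
    (fun acc t =>
      let p := sortedinputlist.foldl
        (fun (p : List (List (String × String)) × List (List String)) hand =>
          if pvGet hand "type" == t then
            (p.1 ++ [hand], p.2 ++ [pvChars (pvGet hand "hand")])
          else p)
        ([], [])
      (acc.1 ++ [p.1], acc.2 ++ [p.2]))
    ([], [])

-- ===== PORT B =====
-- B: dicts keyed by the 7 types with empty buckets, one pass appending each hand
-- into its bucket (hands of an unlisted type are skipped), then the values in order.
def grouphandsbytype_alt (sortedinputlist : List (List (String × String))) : (List (List (List (String × String)))) × List (List (List String)) :=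
  let buckets : PySem.Dict String (List (List (String × String))) :=
    pvTypes.foldl (fun d t => d.insert t []) PySem.Dict.empty
  let handbuckets : PySem.Dict String (List (List String)) :=
    pvTypes.foldl (fun d t => d.insert t []) PySem.Dict.empty
  let res := sortedinputlist.foldl
    (fun (dh : PySem.Dict String (List (List (String × String))) × PySem.Dict String (List (List String))) hand =>
      let t := pvGet hand "type"
      if dh.1.contains t then
        (dh.1.modify t [] (· ++ [hand]),
         dh.2.modify t [] (· ++ [pvChars (pvGet hand "hand")]))
      else dh)
    (buckets, handbuckets)
  (res.1.values, res.2.values)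

-- ===== PRECONDITION & SPEC =====
-- Pre_ excludes exactly the inputs on which the Python A raises KeyError: a hand
-- missing the "type" key, or a hand whose type is one of the 7 but missing "hand".
def Pre_grouphandsbytype (sortedinputlist : List (List (String × String))) : Prop :=
  ∀ hand ∈ sortedinputlist,
    ((PySem.Dict.mk hand).contains "type" = true) ∧
    ((PySem.Dict.mk hand).getD "type" "" ∈ pvTypes → (PySem.Dict.mk hand).contains "hand" = true)
instance (sortedinputlist : List (List (String × String))) : Decidable (Pre_grouphandsbytype sortedinputlist) := by unfold Pre_grouphandsbytype; infer_instance

def pvWitness_grouphandsbytype : (List (List (String × String))) :=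
  [[("type", "four"), ("hand", "AA2AA")], [("type", "high"), ("hand", "23456")], [("type", "weird")]]

def Spec_grouphandsbytype (sortedinputlist : List (List (String × String))) (out : (List (List (List (String × String)))) × List (List (List String))) : Prop := out = grouphandsbytype_alt sortedinputlist
instance (sortedinputlist : List (List (String × String))) (out : (List (List (List (String × String)))) × List (List (List String))) : Decidable (Spec_grouphandsbytype sortedinputlist out) := by unfold Spec_grouphandsbytype; infer_instance

-- ===== CLAIM (what is proved, stated in full; the proofs are below) =====
def Claim_equal_grouphandsbytype : Prop := ∀ (sortedinputlist : List (List (String × String))), Dom_grouphandsbytype sortedinputlist → Pre_grouphandsbytype sortedinputlist → Spec_grouphandsbytype sortedinputlist (grouphandsbytype sortedinputlist)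

-- ===== LEMMAS AND PROOFS =====

-- A's inner scan over the input for a fixed type t collects exactly the filtered
-- hands and their char lists.
theorem pvA_inner (t : String) (xs : List (List (String × String)))
    (a : List (List (String × String))) (b : List (List String)) :
    xs.foldl
      (fun (p : List (List (String × String)) × List (List String)) hand =>
        if pvGet hand "type" == t then
          (p.1 ++ [hand], p.2 ++ [pvChars (pvGet hand "hand")])
        else p)
      (a, b)
    = (a ++ xs.filter (fun hand => pvGet hand "type" == t),
       b ++ (xs.filter (fun hand => pvGet hand "type" == t)).map
              (fun hand => pvChars (pvGet hand "hand"))) := by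
  induction xs generalizing a b with
  | nil => simp
  | cons h rest ih =>
    rw [List.foldl_cons, List.filter_cons]
    by_cases hc : (pvGet h "type" == t) = true
    · rw [if_pos hc, if_pos hc, ih]; simp
    · rw [if_neg hc, if_neg hc, ih]

-- A's outer loop over the type names appends one pair of groups per type.
theorem pvA_outer (ts : List String)
    (F : String → List (List (String × String))) (G : String → List (List String))
    (a : List (List (List (String × String)))) (b : List (List (List String))) :
    ts.foldl (fun acc t => (acc.1 ++ [F t], acc.2 ++ [G t])) (a, b)
      = (a ++ ts.map F, b ++ ts.map G) := by
  induction ts generalizing a b with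
  | nil => simp
  | cons t rest ih => simp [List.foldl_cons, ih]

-- B's guarded bucket loop: the pair fold is componentwise (the guard only reads
-- the first dict's keys, which agree with the second dict's keys throughout).
theorem pvB_split (xs : List (List (String × String)))
    (d : PySem.Dict String (List (List (String × String))))
    (e : PySem.Dict String (List (List String)))
    (hk : ∀ t, d.contains t = e.contains t) :
    xs.foldl
      (fun (dh : PySem.Dict String (List (List (String × String))) × PySem.Dict String (List (List String))) hand =>
        let t := pvGet hand "type"
        if dh.1.contains t then
          (dh.1.modify t [] (· ++ [hand]),
           dh.2.modify t [] (· ++ [pvChars (pvGet hand "hand")]))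
        else dh)
      (d, e)
    = (xs.foldl (fun d hand =>
          if d.contains (pvGet hand "type") then
            d.modify (pvGet hand "type") [] (· ++ [hand]) else d) d,
       xs.foldl (fun e hand =>
          if e.contains (pvGet hand "type") then
            e.modify (pvGet hand "type") [] (· ++ [pvChars (pvGet hand "hand")]) else e) e) := by
  induction xs generalizing d e with
  | nil => simp
  | cons h rest ih =>
    by_cases hc : d.contains (pvGet h "type") = true
    · simp only [List.foldl_cons, hc, ← hk]
      exact ih _ _ (by
        intro t
        simp [PySem.Dict.contains_modify, hk t])
    · simp only [List.foldl_cons, hc, ← hk, Bool.false_eq_true]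
      exact ih _ _ hk

-- a guarded modify-append loop keyed by a hand's type: bucket t collects exactly
-- the hands of type t (when t is a key of d), and d's key set never changes.
theorem pvB_bucket {ν : Type} (key : List (String × String) → String)
    (g : List (String × String) → ν)
    (xs : List (List (String × String))) (d : PySem.Dict String (List ν)) (t : String) :
    (xs.foldl (fun d hand =>
        if d.contains (key hand) then d.modify (key hand) [] (· ++ [g hand]) else d) d).getD t []
    = d.getD t [] ++
        (if d.contains t then ((xs.filter (fun hand => key hand == t)).map g) else []) := by
  induction xs generalizing d with
  | nil => simp
  | cons h rest ih =>
    simp only [List.foldl_cons, List.filter_cons]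
    by_cases hc : d.contains (key h) = true
    · rw [if_pos hc, ih]
      by_cases hkt : t = key h
      · subst hkt
        simp [PySem.Dict.contains_modify, hc]
      · have : (key h == t) = false := by
          simp; exact fun e => hkt e.symm
        simp [PySem.Dict.getD_modify, PySem.Dict.contains_modify, hkt, this]
    · rw [if_neg hc, ih]
      by_cases hkt : t = key h
      · subst hkt
        simp [hc]
      · have : (key h == t) = false := by
          simp; exact fun e => hkt e.symm
        simp [this]

theorem pvB_keys {ν : Type} (key : List (String × String) → String)
    (g : List (String × String) → ν)
    (xs : List (List (String × String))) (d : PySem.Dict String (List ν)) :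
    (xs.foldl (fun d hand =>
        if d.contains (key hand) then d.modify (key hand) [] (· ++ [g hand]) else d) d).keys
    = d.keys := by
  induction xs generalizing d with
  | nil => rfl
  | cons h rest ih =>
    simp only [List.foldl_cons]
    by_cases hc : d.contains (key h) = true
    · rw [if_pos hc, ih]
      rw [PySem.Dict.keys_modify, PySem.Dict.keys_insert_of_contains _ _ hc]
    · rw [if_neg hc, ih]

-- the initial dict of empty buckets, computed
theorem pvB_init {ν : Type} :
    pvTypes.foldl (fun d t => d.insert t ([] : List ν)) PySem.Dict.empty
      = PySem.Dict.mk [("five", []), ("four", []), ("full", []), ("three", []),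
                       ("two", []), ("one", []), ("high", [])] := rfl

theorem pvB_init_keys {ν : Type} :
    (pvTypes.foldl (fun d t => d.insert t ([] : List ν)) PySem.Dict.empty).keys = pvTypes := rfl

theorem pvB_init_contains {ν : Type} (t : String) :
    (pvTypes.foldl (fun d t => d.insert t ([] : List ν)) PySem.Dict.empty).contains t
      = decide (t ∈ pvTypes) := by
  rw [pvB_init, PySem.Dict.contains_mk]
  simp only [pvTypes, List.any_cons, List.any_nil, Bool.or_false,
    Bool.beq_eq_decide_eq, List.mem_cons, List.not_mem_nil, or_false,
    Bool.decide_or, eq_comm (a := t)]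

theorem pvB_init_getD {ν : Type} (t : String) :
    (pvTypes.foldl (fun d t => d.insert t ([] : List ν)) PySem.Dict.empty).getD t [] = [] := by
  rw [pvB_init]
  simp only [PySem.Dict.getD_eq_get?_getD]
  simp only [PySem.Dict.get?_mk_cons]
  repeat' split
  all_goals rfl

theorem pvB_init_nodup {ν : Type} :
    (pvTypes.foldl (fun d t => d.insert t ([] : List ν)) PySem.Dict.empty).keys.Nodup := by
  rw [pvB_init_keys]; decide

-- one bucket dict, read out as values, is the per-type filter map
theorem pvB_values {ν : Type} (g : List (String × String) → ν)
    (xs : List (List (String × String))) :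
    (xs.foldl (fun d hand =>
        if d.contains (pvGet hand "type") then
          d.modify (pvGet hand "type") [] (· ++ [g hand]) else d)
      (pvTypes.foldl (fun d t => d.insert t ([] : List ν)) PySem.Dict.empty)).values
    = pvTypes.map (fun t => (xs.filter (fun hand => pvGet hand "type" == t)).map g) := by
  set d0 : PySem.Dict String (List ν) :=
    pvTypes.foldl (fun d t => d.insert t ([] : List ν)) PySem.Dict.empty with hd0
  have hnd : (xs.foldl (fun d hand =>
      if d.contains (pvGet hand "type") then
        d.modify (pvGet hand "type") [] (· ++ [g hand]) else d) d0).keys.Nodup := by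
    rw [pvB_keys]; exact pvB_init_nodup
  rw [PySem.Dict.values_eq_map_keys _ hnd []]
  rw [pvB_keys (fun hand => pvGet hand "type") g xs d0, hd0, pvB_init_keys]
  apply List.map_congr_left
  intro t ht
  rw [pvB_bucket (fun hand => pvGet hand "type") g xs d0 t]
  rw [pvB_init_getD, pvB_init_contains]
  simp [ht]

-- ===== VERDICT (by name: the statement is the Claim_ definition above) =====
theorem grouphandsbytype_spec : Claim_equal_grouphandsbytype := by
  intro xs _ _
  unfold Spec_grouphandsbytype grouphandsbytype grouphandsbytype_alt
  simp only [pvA_inner, pvA_outer, List.nil_append]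
  rw [pvB_split]
  · simp only [pvB_values]
    simp
  · intro t
    rw [pvB_init_contains, pvB_init_contains]
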